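-- pv_equiv track=rewrite | github.com/PerrkFolio/skccad | exchanges/functions/strConvertion.py | remove_letters_in_string
-- ===== SOURCE A (Python) =====
-- def remove_letters_in_string(string):
--     string = string.replace(" ", "")
--     for letter in string:
--         if letter == ",":
--             string = string.split(",")
--             string = string[0]
--             break
--         try:
--             _ = int(letter)
--         except:
--             string = string.replace(letter, "", 1)
--     return string
-- ===== SOURCE B (Python) =====
-- def remove_letters_in_string(string):
--     head = string.replace(" ", "").split(",")[0]
--     return "".join(c for c in head if "0" <= c <= "9")
-- ===== Notes on version B (the rewrite author's own statement) =====
-- stated objective: faster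
-- what changed: B isolates the pre-comma region with one split and returns its digits in a single filtering pass, replacing A's char-by-char loop that performs a one-occurrence replace-deletion of the whole string for every non-digit character and rescans at the comma.
import Mathlib
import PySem

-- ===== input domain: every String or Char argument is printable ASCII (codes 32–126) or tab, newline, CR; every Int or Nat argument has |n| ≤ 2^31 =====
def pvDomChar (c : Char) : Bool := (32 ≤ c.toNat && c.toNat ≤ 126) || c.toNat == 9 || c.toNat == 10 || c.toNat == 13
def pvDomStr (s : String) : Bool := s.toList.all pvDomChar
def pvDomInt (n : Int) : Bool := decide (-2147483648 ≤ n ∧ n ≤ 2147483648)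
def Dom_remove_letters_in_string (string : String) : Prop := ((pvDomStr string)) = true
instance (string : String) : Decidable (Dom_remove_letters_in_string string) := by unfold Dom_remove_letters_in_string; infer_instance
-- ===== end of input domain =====

-- B isolates the pre-comma region with split and keeps its digits in one filtering pass,
-- instead of A's char-by-char loop of one-occurrence replace-deletions; objective: simpler.


-- ===== PORT A =====
-- string.replace(letter, "", 1): PySem has no count-limited replace; for a single-char
-- pattern and empty replacement it is exactly "drop the first occurrence", ported by hand:
def pvRemoveFirst : List Char → Char → List Char
  | [], _ => []
  | x :: xs, c => if x = c then xs else x :: pvRemoveFirst xs c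

-- the for-loop: iterates over the string as it was at loop entry, while `string` (s) is reassigned
def pvALoop : List Char → List Char → List Char
  | [], s => s
  | letter :: rest, s =>
    if letter = ',' then
      -- string = string.split(","); string = string[0]; break  (split(...) is never empty, so [0] never raises)
      (PySem.Chars.splitOn s [',']).headD []
    else if (PySem.Int.ofChars? [letter]).isSome then  -- try: _ = int(letter)
      pvALoop rest s
    else
      pvALoop rest (pvRemoveFirst s letter)            -- string = string.replace(letter, "", 1)

def remove_letters_in_string (string : String) : String :=
  let s0 := (PySem.Str.replace string " " "").toList
  String.ofList (pvALoop s0 s0)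

-- ===== PORT B =====
def remove_letters_in_string_alt (string : String) : String :=
  let head := (PySem.Chars.splitOn (PySem.Str.replace string " " "").toList [',']).headD []
  -- "".join(c for c in head if "0" <= c <= "9")
  String.ofList (head.filter (fun c => decide ('0' ≤ c) && decide (c ≤ '9')))

-- ===== PRECONDITION & SPEC =====
def Spec_remove_letters_in_string (string : String) (out : String) : Prop := out = remove_letters_in_string_alt string
instance (string : String) (out : String) : Decidable (Spec_remove_letters_in_string string out) := by unfold Spec_remove_letters_in_string; infer_instance

-- ===== CLAIM (what is proved, stated in full; the proofs are below) =====
def Claim_equal_remove_letters_in_string : Prop := ∀ (string : String), Dom_remove_letters_in_string string → Spec_remove_letters_in_string string (remove_letters_in_string string)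

-- ===== LEMMAS AND PROOFS =====

-- replace cs " " "" is the filter that drops spaces
theorem pvReplaceGo_space (fuel : Nat) : ∀ (l acc : List Char), l.length ≤ fuel →
    PySem.Chars.replace.go [' '] [] fuel l acc = acc.reverse ++ l.filter (fun c => !(c == ' ')) := by
  induction fuel with
  | zero =>
    intro l acc h
    have : l = [] := List.eq_nil_of_length_eq_zero (Nat.le_zero.mp h)
    subst this
    rw [PySem.Chars.replace.go.eq_def]; simp
  | succ n ih =>
    intro l acc h
    cases l with
    | nil => rw [PySem.Chars.replace.go.eq_def]; simp
    | cons c t =>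
      simp only [List.length_cons, Nat.add_le_add_iff_right] at h
      by_cases hc : c = ' '
      · subst hc
        rw [PySem.Chars.replace.go.eq_def]
        simp only [List.isPrefixOf, BEq.rfl, Bool.true_and, if_true,
          List.length_cons, List.length_nil, List.drop_succ_cons, List.drop_zero, List.reverse_nil,
          List.nil_append]
        rw [ih t acc h]
        simp
      · have hpre : (' ' == c) = false := beq_eq_false_iff_ne.mpr (fun hx => hc hx.symm)
        rw [PySem.Chars.replace.go.eq_def]
        simp only [List.isPrefixOf, hpre, Bool.false_and, Bool.false_eq_true, if_false]
        rw [ih t (c :: acc) h]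
        simp [hc]

theorem pvReplace_space (cs : List Char) :
    PySem.Chars.replace cs [' '] [] = cs.filter (fun c => !(c == ' ')) := by
  rw [PySem.Chars.replace]
  simp only [List.isEmpty_cons, if_false, Bool.false_eq_true]
  simpa using pvReplaceGo_space cs.length cs [] le_rfl

-- first piece of split(",") is the prefix before the first comma
theorem pvSplitGo_head (fuel : Nat) : ∀ (l cur : List Char) (acc : List (List Char)), l.length < fuel →
    ∃ tail, PySem.Chars.splitOn.go [','] fuel l cur acc
      = acc.reverse ++ (cur.reverse ++ l.takeWhile (fun c => !(c == ','))) :: tail := by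
  induction fuel with
  | zero => intro l cur acc h; omega
  | succ n ih =>
    intro l cur acc h
    cases l with
    | nil =>
      refine ⟨[], ?_⟩
      rw [PySem.Chars.splitOn.go.eq_def]
      simp
    | cons c t =>
      simp only [List.length_cons, Nat.add_lt_add_iff_right] at h
      by_cases hc : c = ','
      · subst hc
        rw [PySem.Chars.splitOn.go.eq_def]
        simp only [List.isPrefixOf, BEq.rfl, Bool.true_and, if_true,
          List.length_cons, List.length_nil, List.drop_succ_cons, List.drop_zero]
        obtain ⟨tail, htail⟩ := ih t [] (cur.reverse :: acc) h
        refine ⟨t.takeWhile (fun c => !(c == ',')) :: tail, ?_⟩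
        rw [htail]
        simp
      · have hpre : (',' == c) = false := beq_eq_false_iff_ne.mpr (fun hx => hc hx.symm)
        rw [PySem.Chars.splitOn.go.eq_def]
        simp only [List.isPrefixOf, hpre, Bool.false_and, Bool.false_eq_true, if_false]
        obtain ⟨tail, htail⟩ := ih t (c :: cur) acc h
        refine ⟨tail, ?_⟩
        rw [htail]
        simp [hc]

theorem pvSplit_head (cs : List Char) :
    (PySem.Chars.splitOn cs [',']).headD [] = cs.takeWhile (fun c => !(c == ',')) := by
  rw [PySem.Chars.splitOn]
  obtain ⟨tail, htail⟩ := pvSplitGo_head (cs.length + 1) cs [] [] (by omega)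
  rw [htail]
  simp

-- int(letter) succeeds exactly on '0'..'9' for the domain's characters (codes 9,10,13,32..126)
theorem pvIntTest (c : Char) (h : pvDomChar c = true) :
    (PySem.Int.ofChars? [c]).isSome = (decide ('0' ≤ c) && decide (c ≤ '9')) := by
  have key : ∀ n : Nat, n < 127 →
      (PySem.Int.ofChars? [Char.ofNat n]).isSome
        = (decide ('0' ≤ Char.ofNat n) && decide (Char.ofNat n ≤ '9')) := by decide
  have hlt : c.toNat < 127 := by
    unfold pvDomChar at h
    simp only [Bool.or_eq_true, Bool.and_eq_true, decide_eq_true_eq, beq_iff_eq] at h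
    omega
  have hval : Char.ofNat c.toNat = c := Char.ofNat_toNat c
  have := key c.toNat hlt
  rwa [hval] at this

-- removing the first occurrence of c from pre ++ c :: rest, with c not in pre, drops that c
theorem pvRemoveFirst_append (pre rest : List Char) (c : Char) (hc : c ∉ pre) :
    pvRemoveFirst (pre ++ c :: rest) c = pre ++ rest := by
  induction pre with
  | nil => simp [pvRemoveFirst]
  | cons x xs ih =>
    simp only [List.mem_cons, not_or] at hc
    simp only [List.cons_append, pvRemoveFirst]
    rw [if_neg (fun hx => hc.1 hx.symm), ih hc.2]

-- loop invariant: the processed prefix has been reduced to its digits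
theorem pvALoop_inv (rest : List Char) : ∀ (pre : List Char),
    (∀ c ∈ rest, pvDomChar c = true) →
    (∀ c ∈ pre, ('0' ≤ c ∧ c ≤ '9')) →
    pvALoop rest (pre ++ rest)
      = pre ++ (rest.takeWhile (fun c => !(c == ','))).filter (fun c => decide ('0' ≤ c) && decide (c ≤ '9')) := by
  induction rest with
  | nil => intro pre _ _; simp [pvALoop]
  | cons c t ih =>
    intro pre hdom hpre
    have hdc : pvDomChar c = true := hdom c (List.mem_cons_self ..)
    by_cases hc : c = ','
    · subst hc
      simp only [pvALoop]
      rw [pvSplit_head]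
      have hnotc : ∀ x ∈ pre, (!(x == ',')) = true := by
        intro x hx
        have := hpre x hx
        simp only [Bool.not_eq_true', beq_eq_false_iff_ne]
        intro hx'; subst hx'
        revert this; decide
      rw [List.takeWhile_append]
      rw [List.takeWhile_eq_self_iff.mpr hnotc]
      simp
    · rw [show pvALoop (c :: t) (pre ++ c :: t)
          = if c = ',' then (PySem.Chars.splitOn (pre ++ c :: t) [',']).headD []
            else if (PySem.Int.ofChars? [c]).isSome then pvALoop t (pre ++ c :: t)
            else pvALoop t (pvRemoveFirst (pre ++ c :: t) c) from rfl]
      rw [if_neg hc, pvIntTest c hdc]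
      by_cases hd : ('0' ≤ c ∧ c ≤ '9')
      · rw [if_pos (by simp [hd.1, hd.2])]
        have : pre ++ c :: t = (pre ++ [c]) ++ t := by simp
        rw [this, ih (pre ++ [c]) (fun x hx => hdom x (List.mem_cons_of_mem _ hx))
          (by intro x hx; rcases List.mem_append.mp hx with hx | hx
              · exact hpre x hx
              · simp at hx; subst hx; exact hd)]
        have hcne : (!(c == ',')) = true := by simp [hc]
        simp [hcne, hd.1, hd.2]
      · rw [if_neg (by simpa using fun h1 h2 => hd ⟨h1, h2⟩)]
        have hcpre : c ∉ pre := fun hx => hd (hpre c hx)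
        rw [pvRemoveFirst_append pre t c hcpre]
        rw [ih pre (fun x hx => hdom x (List.mem_cons_of_mem _ hx)) hpre]
        have hcne : (!(c == ',')) = true := by simp [hc]
        have hdd : (decide ('0' ≤ c) && decide (c ≤ '9')) = false := by
          simpa using fun h1 h2 => hd ⟨h1, h2⟩
        simp [hcne, hdd]

-- ===== VERDICT (by name: the statement is the Claim_ definition above) =====
theorem remove_letters_in_string_spec : Claim_equal_remove_letters_in_string := by
  intro string hdom
  unfold Spec_remove_letters_in_string remove_letters_in_string remove_letters_in_string_alt
  have hlist : (PySem.Str.replace string " " "").toList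
      = string.toList.filter (fun c => !(c == ' ')) := by
    rw [PySem.Str.toList_replace]
    simpa using pvReplace_space string.toList
  have hdomall : ∀ c ∈ (PySem.Str.replace string " " "").toList, pvDomChar c = true := by
    intro c hcmem
    rw [hlist] at hcmem
    have := List.mem_of_mem_filter hcmem
    unfold Dom_remove_letters_in_string pvDomStr at hdom
    exact List.all_eq_true.mp hdom c this
  have := pvALoop_inv (PySem.Str.replace string " " "").toList [] hdomall (by simp)
  simp only [List.nil_append] at this
  simp only [this, pvSplit_head]
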